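-- pv_equiv track=rewrite | github.com/maciejsobieniak/code-kata | codesignal/2/solution.py | reversed_triple_chars
-- ===== SOURCE A (Python) =====
-- def reversed_triple_chars(s: str) -> str:
--     result = ''
--     length = len(s)
--     for i in range(0, length, 3):
--         if len(s[i:i+3]) == 3:
--             result += s[i:i+3][::-1]
--         else:
--             result += s[i:i+3]
--     return result
-- ===== SOURCE B (Python) =====
-- def reversed_triple_chars(s: str) -> str:
--     # Reverse each full 3-char group in place by swapping its outer characters;
--     # the middle char and any 1-2 char tail never move.
--     chars = list(s)
--     for i in range(2, len(chars), 3):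
--         chars[i - 2], chars[i] = chars[i], chars[i - 2]
--     return ''.join(chars)
-- ===== Notes on version B (the rewrite author's own statement) =====
-- stated objective: faster
-- what changed: B replaces A's slice-and-concatenate loop (building a new string from reversed 3-char slices) with a single in-place pass over a char list that swaps the outer characters of each full triple (range(2, len, 3)), leaving the middle char and any short tail untouched, then joins once.
import Mathlib
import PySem

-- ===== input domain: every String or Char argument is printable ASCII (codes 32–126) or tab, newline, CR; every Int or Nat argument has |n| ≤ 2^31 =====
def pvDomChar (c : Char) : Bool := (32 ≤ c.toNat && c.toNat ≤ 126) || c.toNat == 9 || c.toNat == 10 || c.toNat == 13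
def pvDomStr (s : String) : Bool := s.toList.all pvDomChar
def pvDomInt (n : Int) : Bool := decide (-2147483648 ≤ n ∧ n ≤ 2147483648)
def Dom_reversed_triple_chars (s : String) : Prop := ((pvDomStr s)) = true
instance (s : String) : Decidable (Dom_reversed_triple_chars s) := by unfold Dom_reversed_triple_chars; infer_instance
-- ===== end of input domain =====

-- B reverses each full 3-char group by swapping its outer characters in one in-place pass
-- instead of A's slice-reverse-and-concatenate loop; alternative decomposition, same results.

-- ===== PORT A =====
-- literal port of A's loop: for i in range(0, len(s), 3): append s[i:i+3][::-1] if full else s[i:i+3]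
def pvACore (l : List Char) : List Char :=
  (PySem.List.pyRange 0 (l.length : Int) 3).foldl
    (fun result i =>
      let chunk := PySem.List.slice l (some i) (some (i + 3))
      if chunk.length = 3 then
        result ++ (PySem.List.slice? chunk none none (-1)).getD []   -- chunk[::-1]
      else
        result ++ chunk)
    []

def reversed_triple_chars (s : String) : String := String.ofList (pvACore s.toList)

-- ===== PORT B =====
-- chars[i-2], chars[i] = chars[i], chars[i-2]; both reads happen before both writes.
-- Indices from range(2, len, 3) are in range, so pyGetD/pySetD are exact here.
def pvSwapStep (chars : List Char) (i : Int) : List Char :=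
  PySem.List.pySetD (PySem.List.pySetD chars (i - 2) (PySem.List.pyGetD chars i ' ')) i
    (PySem.List.pyGetD chars (i - 2) ' ')

def pvBCore (l : List Char) : List Char :=
  (PySem.List.pyRange 2 (l.length : Int) 3).foldl pvSwapStep l

def reversed_triple_chars_alt (s : String) : String := String.ofList (pvBCore s.toList)

-- ===== PRECONDITION & SPEC =====
def Spec_reversed_triple_chars (s : String) (out : String) : Prop := out = reversed_triple_chars_alt s
instance (s : String) (out : String) : Decidable (Spec_reversed_triple_chars s out) := by unfold Spec_reversed_triple_chars; infer_instance

-- ===== CLAIM (what is proved, stated in full; the proofs are below) =====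
def Claim_equal_reversed_triple_chars : Prop := ∀ (s : String), Dom_reversed_triple_chars s → Spec_reversed_triple_chars s (reversed_triple_chars s)

-- ===== LEMMAS AND PROOFS =====

-- proof-side specification: reverse each leading full triple, keep the short tail
def pvTriSpec : List Char → List Char
  | a :: b :: c :: rest => c :: b :: a :: pvTriSpec rest
  | l => l

lemma pvTriSpec_short (l : List Char) (h : l.length < 3) : pvTriSpec l = l := by
  match l, h with
  | [], _ => rfl
  | [a], _ => rfl
  | [a, b], _ => rfl

lemma pvPyRange3_nil (a b : Int) (h : b ≤ a) : PySem.List.pyRange a b 3 = [] := by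
  rw [PySem.List.pyRange_of_pos a b (by norm_num), if_neg (by omega)]
  simp

lemma pvPyRange3_cons (a b : Int) (h : a < b) :
    PySem.List.pyRange a b 3 = a :: PySem.List.pyRange (a + 3) b 3 := by
  rw [PySem.List.pyRange_of_pos a b (by norm_num),
    PySem.List.pyRange_of_pos (a + 3) b (by norm_num), if_pos h]
  by_cases h2 : a + 3 < b
  · rw [if_pos h2]
    have hc : ((b - a + 3 - 1) / 3).toNat = ((b - (a + 3) + 3 - 1) / 3).toNat + 1 := by omega
    rw [hc, List.range_succ_eq_map, List.map_cons, List.map_map]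
    refine congrArg₂ _ (by simp) (List.map_congr_left ?_)
    intro k _
    simp [Function.comp]
    ring
  · rw [if_neg h2]
    have hc : ((b - a + 3 - 1) / 3).toNat = 1 := by omega
    rw [hc]
    simp

-- A's loop, started at index j, produces the spec of the remaining suffix
lemma pvLoopA (full : List Char) (j : Nat) (acc : List Char) :
    ((PySem.List.pyRange (j : Int) (full.length : Int) 3).foldl
      (fun result i =>
        let chunk := PySem.List.slice full (some i) (some (i + 3))
        if chunk.length = 3 then
          result ++ (PySem.List.slice? chunk none none (-1)).getD []
        else
          result ++ chunk)
      acc)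
      = acc ++ pvTriSpec (full.drop j) := by
  by_cases hj : full.length ≤ j
  · rw [pvPyRange3_nil _ _ (by exact_mod_cast hj)]
    rw [List.drop_eq_nil_of_le hj, pvTriSpec_short [] (by simp)]
    simp
  · replace hj : j < full.length := Nat.lt_of_not_le hj
    rw [pvPyRange3_cons _ _ (by exact_mod_cast hj), List.foldl_cons]
    have hslice : PySem.List.slice full (some (j : Int)) (some ((j : Int) + 3))
        = (full.drop j).take 3 := by
      have h3 : ((j : Int) + 3) = ((j + 3 : Nat) : Int) := by omega
      rw [h3, PySem.List.slice_natCast]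
      congr 1
      omega
    by_cases hbig : 3 ≤ full.length - j
    · obtain ⟨a, b, c, rest, hd⟩ :
          ∃ a b c rest, full.drop j = a :: b :: c :: rest := by
        have hlen : 3 ≤ (full.drop j).length := by simp; omega
        match hdj : full.drop j, hlen with
        | a :: b :: c :: rest, _ => exact ⟨a, b, c, rest, rfl⟩
      have hchunk : PySem.List.slice full (some (j : Int)) (some ((j : Int) + 3))
          = [a, b, c] := by rw [hslice, hd]; rfl
      have h35 : (j : Int) + 3 = ((j + 3 : Nat) : Int) := by omega
      have hacc : (let chunk := PySem.List.slice full (some (j : Int)) (some ((j : Int) + 3))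
          if chunk.length = 3 then
            acc ++ (PySem.List.slice? chunk none none (-1)).getD []
          else
            acc ++ chunk) = acc ++ [c, b, a] := by
        simp only [hchunk, PySem.List.slice?_none_none_neg_one]
        rfl
      rw [hacc, h35]
      rw [pvLoopA full (j + 3) (acc ++ [c, b, a])]
      have hdrop : full.drop (j + 3) = rest := by
        have h2 := congrArg (List.drop 3) hd
        simp only [List.drop_drop] at h2
        simpa [Nat.add_comm] using h2
      rw [hdrop, hd]
      simp [pvTriSpec]
    · have hchunk : PySem.List.slice full (some (j : Int)) (some ((j : Int) + 3))
          = full.drop j := by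
        rw [hslice, List.take_of_length_le (by simp; omega)]
      have hne : (full.drop j).length ≠ 3 := by simp; omega
      simp only [hchunk]
      rw [if_neg hne]
      rw [pvPyRange3_nil _ _ (by omega)]
      rw [pvTriSpec_short _ (by simp; omega)]
      simp
termination_by full.length - j
decreasing_by omega

-- B's swap loop, with a fixed already-processed prefix, produces the spec of the suffix
lemma pvLoopB (pref l : List Char) :
    ((PySem.List.pyRange ((pref.length : Int) + 2) ((pref.length : Int) + (l.length : Int)) 3).foldl
      pvSwapStep (pref ++ l)) = pref ++ pvTriSpec l := by
  match l with
  | [] => rw [pvPyRange3_nil _ _ (by simp)]; rfl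
  | [a] => rw [pvPyRange3_nil _ _ (by simp)]; rfl
  | [a, b] => rw [pvPyRange3_nil _ _ (by simp)]; rfl
  | a :: b :: c :: rest =>
    have hcons := pvPyRange3_cons ((pref.length : Int) + 2)
      ((pref.length : Int) + ((a :: b :: c :: rest).length : Int)) (by simp only [List.length_cons]; omega)
    rw [hcons, List.foldl_cons]
    have hget2 : PySem.List.pyGetD (pref ++ a :: b :: c :: rest) ((pref.length : Int) + 2) ' ' = c := by
      have : (pref.length : Int) + 2 = ((pref.length + 2 : Nat) : Int) := by omega
      rw [this, PySem.List.pyGetD_natCast]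
      rw [List.getD_eq_getElem?_getD, List.getElem?_append_right (by omega)]
      simp
    have hget0 : PySem.List.pyGetD (pref ++ a :: b :: c :: rest) ((pref.length : Int) + 2 - 2) ' ' = a := by
      have : (pref.length : Int) + 2 - 2 = ((pref.length : Nat) : Int) := by ring
      rw [this, PySem.List.pyGetD_natCast]
      rw [List.getD_eq_getElem?_getD, List.getElem?_append_right (by omega)]
      simp
    have hstate : pvSwapStep (pref ++ a :: b :: c :: rest) ((pref.length : Int) + 2)
        = (pref ++ [c, b, a]) ++ rest := by
      unfold pvSwapStep
      rw [hget2, hget0]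
      have e0 : (pref.length : Int) + 2 - 2 = ((pref.length : Nat) : Int) := by ring
      have e2 : (pref.length : Int) + 2 = ((pref.length + 2 : Nat) : Int) := by omega
      rw [e0, PySem.List.pySetD_natCast, e2, PySem.List.pySetD_natCast]
      rw [List.set_append, if_neg (by omega), Nat.sub_self]
      rw [List.set_append, if_neg (by omega)]
      have : pref.length + 2 - pref.length = 2 := by omega
      rw [this]
      simp
    rw [hstate]
    have ih := pvLoopB (pref ++ [c, b, a]) rest
    have harg : ((pref ++ [c, b, a]).length : Int) + 2 = (pref.length : Int) + 2 + 3 := by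
      simp; ring
    have harg2 : ((pref ++ [c, b, a]).length : Int) + (rest.length : Int)
        = (pref.length : Int) + ((a :: b :: c :: rest).length : Int) := by
      simp; ring
    rw [harg, harg2] at ih
    rw [ih]
    simp [pvTriSpec]

lemma pvACore_eq (l : List Char) : pvACore l = pvTriSpec l := by
  unfold pvACore
  have := pvLoopA l 0 []
  simpa using this

lemma pvBCore_eq (l : List Char) : pvBCore l = pvTriSpec l := by
  unfold pvBCore
  have := pvLoopB [] l
  simpa using this

-- ===== VERDICT (by name: the statement is the Claim_ definition above) =====
theorem reversed_triple_chars_spec : Claim_equal_reversed_triple_chars := by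
  intro s _
  unfold Spec_reversed_triple_chars reversed_triple_chars reversed_triple_chars_alt
  rw [pvACore_eq, pvBCore_eq]
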